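-- pv_equiv track=rewrite | github.com/SuperPracion/STEPIK-course-Python-Advanced | Section 4.3/collecting_symbols.py | zip_duplicates
-- ===== SOURCE A (Python) =====
-- def search_index_complex(mass, symbol):
--     index = -1
--
--     for collection in mass:
--         if symbol in collection:
--             index = mass.index(collection)
--
--     return index
--
-- def zip_duplicates(string):
--     gen_mass = []
--
--     for symbol in string:
--         index_collection = search_index_complex(gen_mass, symbol)
--
--         if index_collection == -1:
--             gen_mass.append([symbol])
--         else:
--             gen_mass[index_collection].append(symbol)
--
--     return gen_mass
-- ===== SOURCE B (Python) =====
-- def zip_duplicates(string):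
--     counts = {}
--     for symbol in string:
--         counts[symbol] = counts.get(symbol, 0) + 1
--     return [[symbol] * count for symbol, count in counts.items()]
-- ===== Notes on version B (the rewrite author's own statement) =====
-- stated objective: faster
-- what changed: Replaces A's per-character scan of all existing groups (plus a list.index rescan) with a single counting pass over a dict keyed by character, then one construction pass emitting [ch]*count per entry in first-appearance order.
import Mathlib
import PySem

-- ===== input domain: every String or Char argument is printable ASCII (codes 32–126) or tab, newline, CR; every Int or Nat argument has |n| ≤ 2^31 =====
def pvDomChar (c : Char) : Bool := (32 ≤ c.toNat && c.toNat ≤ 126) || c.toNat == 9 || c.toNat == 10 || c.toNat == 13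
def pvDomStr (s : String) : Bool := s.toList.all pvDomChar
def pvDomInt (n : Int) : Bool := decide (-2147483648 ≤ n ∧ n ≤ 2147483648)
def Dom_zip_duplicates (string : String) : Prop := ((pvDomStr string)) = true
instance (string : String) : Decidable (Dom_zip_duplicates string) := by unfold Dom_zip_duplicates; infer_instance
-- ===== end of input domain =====

-- B replaces A's quadratic group-scan (rescanning the group list for every character)
-- with a single counting pass over a dict followed by one [ch]*count construction pass (objective: faster).

-- ===== PORT A =====
-- literal port of search_index_complex: scan all collections, remember mass.index of the last one containing symbol
def search_index_complex (mass : List (List String)) (symbol : String) : Int :=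
  mass.foldl (fun index collection =>
    if symbol ∈ collection then
      -- mass.index(collection): cannot raise, collection is drawn from mass
      match PySem.List.index? mass collection with
      | some i => (i : Int)
      | none => index
    else index) (-1)

def zip_duplicates (string : String) : List (List String) :=
  string.toList.foldl (fun gen_mass c =>
    let symbol := String.singleton c
    let index_collection := search_index_complex gen_mass symbol
    if index_collection == -1 then gen_mass ++ [[symbol]]
    else gen_mass.modify index_collection.toNat (fun col => col ++ [symbol])) []

-- ===== PORT B =====
def zip_duplicates_alt (string : String) : List (List String) :=
  let counts : PySem.Dict String Int := string.toList.foldl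
    (fun d c => d.insert (String.singleton c) (d.getD (String.singleton c) 0 + 1))
    PySem.Dict.empty
  counts.items.map (fun p => PySem.List.pyRepeat [p.1] p.2)

-- ===== PRECONDITION & SPEC =====
def Spec_zip_duplicates (string : String) (out : List (List String)) : Prop := out = zip_duplicates_alt string
instance (string : String) (out : List (List String)) : Decidable (Spec_zip_duplicates string out) := by unfold Spec_zip_duplicates; infer_instance

-- ===== CLAIM (what is proved, stated in full; the proofs are below) =====
def Claim_equal_zip_duplicates : Prop := ∀ (string : String), Dom_zip_duplicates string → Spec_zip_duplicates string (zip_duplicates string)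

-- ===== LEMMAS AND PROOFS =====

-- the canonical grouping both programs compute: one group per distinct symbol, in
-- first-appearance order, of size count
def pvGroups (l : List String) : List (List String) :=
  (PySem.Set.ofList l).map (fun k => List.replicate (l.count k) k)

theorem pvRepl_ne {k s : String} {n m : Nat} (hk : k ≠ s) (hn : 0 < n) :
    List.replicate n k ≠ List.replicate m s := by
  intro h
  have hkm : k ∈ List.replicate n k := List.mem_replicate.mpr ⟨by omega, rfl⟩
  rw [h] at hkm
  exact hk (List.eq_of_mem_replicate hkm)

-- collections not containing the symbol leave the accumulator unchanged
theorem pvSearch_skip (mass : List (List String)) (s : String) (l : List (List String))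
    (h : ∀ c ∈ l, s ∉ c) (init : Int) :
    l.foldl (fun index collection =>
      if s ∈ collection then
        match PySem.List.index? mass collection with
        | some i => (i : Int)
        | none => index
      else index) init = init := by
  induction l generalizing init with
  | nil => rfl
  | cons c t ih =>
    have hc : s ∉ c := h c (by simp)
    simp only [List.foldl_cons, if_neg hc]
    exact ih (fun x hx => h x (by simp [hx])) init

theorem pvModify_middle (pre : List (List String)) (c : List String) (suf : List (List String))
    (f : List String → List String) :
    (pre ++ c :: suf).modify pre.length f = pre ++ f c :: suf := by
  simp [List.modify_eq_set_getElem?]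

theorem pvSearch_none (m : List (List String)) (s : String) (h : ∀ c ∈ m, s ∉ c) :
    search_index_complex m s = -1 := by
  unfold search_index_complex
  exact pvSearch_skip m s m h (-1)

theorem pvSearch_found (pre suf : List (List String)) (c : List String) (s : String)
    (hs : s ∈ c) (hpre : ∀ x ∈ pre, s ∉ x) (hsuf : ∀ x ∈ suf, s ∉ x) (hnotpre : c ∉ pre) :
    search_index_complex (pre ++ c :: suf) s = pre.length := by
  unfold search_index_complex
  have hidx : PySem.List.index? (pre ++ c :: suf) c = some pre.length := by
    have h1 : (pre ++ c :: suf) = (pre ++ [c]) ++ suf := by simp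
    rw [h1, PySem.List.index?_append_of_mem suf (by simp)]
    exact PySem.List.index?_append_singleton_self pre c hnotpre
  rw [List.foldl_append, pvSearch_skip _ s pre hpre (-1)]
  simp only [List.foldl_cons, if_pos hs, hidx]
  exact pvSearch_skip _ s suf hsuf _

-- A's loop step preserves the pvGroups shape (reverse-induction step)
theorem pvA_step (l : List String) (s : String) :
    (let index_collection := search_index_complex (pvGroups l) s
     if index_collection == -1 then pvGroups l ++ [[s]]
     else (pvGroups l).modify index_collection.toNat (fun col => col ++ [s]))
    = pvGroups (l ++ [s]) := by
  by_cases hmem : s ∈ l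
  · -- s already has a group: search finds it, modify appends
    have hS : s ∈ PySem.Set.ofList l := (PySem.Set.mem_ofList l s).mpr hmem
    obtain ⟨S1, S2, hsplit⟩ := List.append_of_mem hS
    have hnd : (PySem.Set.ofList l).Nodup := PySem.Set.nodup_ofList l
    rw [hsplit] at hnd
    have hS1 : s ∉ S1 := fun h => (List.disjoint_of_nodup_append hnd) h (by simp)
    have hS2 : s ∉ S2 := (List.nodup_cons.mp (List.nodup_append.mp hnd).2.1).1
    have hmemS : ∀ k, k ∈ S1 ∨ k ∈ S2 → k ∈ l := by
      intro k hk
      apply (PySem.Set.mem_ofList l k).mp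
      rw [hsplit]; rcases hk with h | h <;> simp [h]
    have hgroups : pvGroups l =
        S1.map (fun k => List.replicate (l.count k) k) ++
        List.replicate (l.count s) s :: S2.map (fun k => List.replicate (l.count k) k) := by
      simp [pvGroups, hsplit]
    have hcnt : 0 < l.count s := List.count_pos_iff.mpr hmem
    have hnotin : ∀ (S : List String), s ∉ S → (∀ k ∈ S, k ∈ l) →
        ∀ x ∈ S.map (fun k => List.replicate (l.count k) k), s ∉ x := by
      intro S hsS hSl x hx hsx
      obtain ⟨k, hk, rfl⟩ := List.mem_map.mp hx
      exact hsS ((List.eq_of_mem_replicate hsx) ▸ hk)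
    have hsearch : search_index_complex (pvGroups l) s = (S1.map (fun k => List.replicate (l.count k) k)).length := by
      rw [hgroups]
      apply pvSearch_found
      · exact List.mem_replicate.mpr ⟨by omega, rfl⟩
      · exact hnotin S1 hS1 (fun k hk => hmemS k (Or.inl hk))
      · exact hnotin S2 hS2 (fun k hk => hmemS k (Or.inr hk))
      · intro hc
        obtain ⟨k, hk, hke⟩ := List.mem_map.mp hc
        have hkne : k ≠ s := fun h => hS1 (h ▸ hk)
        exact pvRepl_ne hkne (List.count_pos_iff.mpr (hmemS k (Or.inl hk))) hke
    have hlen : (((S1.map (fun k => List.replicate (l.count k) k)).length : Int) == -1) = false := by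
      simp only [beq_eq_false_iff_ne]; intro h; omega
    simp only [hsearch, hlen, Int.toNat_natCast]
    rw [if_neg (by simp), hgroups, pvModify_middle]
    -- now compare with pvGroups (l ++ [s])
    have hset : PySem.Set.ofList (l ++ [s]) = PySem.Set.ofList l := by
      rw [PySem.Set.ofList_append_singleton, PySem.Set.add_of_mem hS]
    have hcount_ne : ∀ k : String, k ≠ s → (l ++ [s]).count k = l.count k := by
      intro k hk; simp [List.count_append, List.count_eq_zero, hk]
    have hcount_s : (l ++ [s]).count s = l.count s + 1 := by
      simp [List.count_append]
    have hmapS : ∀ (S : List String), s ∉ S →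
        S.map (fun k => List.replicate ((l ++ [s]).count k) k) =
        S.map (fun k => List.replicate (l.count k) k) := by
      intro S hsS
      apply List.map_congr_left
      intro k hk
      rw [hcount_ne k (fun h => hsS (h ▸ hk))]
    simp only [pvGroups]
    rw [hset, hsplit]
    simp only [List.map_append, List.map_cons, hmapS S1 hS1, hmapS S2 hS2, hcount_s]
    rw [List.replicate_succ' (n := l.count s) (a := s)]
  · -- s is new: search returns -1, append a fresh [s] group
    have hnone : ∀ c ∈ pvGroups l, s ∉ c := by
      intro c hc hsc
      obtain ⟨k, hk, rfl⟩ := List.mem_map.mp hc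
      exact hmem ((PySem.Set.mem_ofList l s).mp ((List.eq_of_mem_replicate hsc) ▸ hk))
    have hsearch := pvSearch_none (pvGroups l) s hnone
    simp only [hsearch, beq_self_eq_true, if_true]
    have hset : PySem.Set.ofList (l ++ [s]) = PySem.Set.ofList l ++ [s] := by
      rw [PySem.Set.ofList_append_singleton, PySem.Set.add_of_not_mem (fun h => hmem ((PySem.Set.mem_ofList l s).mp h))]
    simp only [pvGroups]
    rw [hset, List.map_append]
    congr 1
    · apply List.map_congr_left
      intro k hk
      have hkne : k ≠ s := fun h => hmem (h ▸ (PySem.Set.mem_ofList l k).mp hk)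
      simp [List.count_append, List.count_eq_zero, hkne]
    · simp [List.count_append, List.count_eq_zero.mpr hmem]

-- A computes pvGroups of the symbol list
theorem pvA_eq (l : List String) :
    l.foldl (fun gen_mass s =>
      let index_collection := search_index_complex gen_mass s
      if index_collection == -1 then gen_mass ++ [[s]]
      else gen_mass.modify index_collection.toNat (fun col => col ++ [s])) []
    = pvGroups l := by
  induction l using List.reverseRecOn with
  | nil => rfl
  | append_singleton t s ih =>
    rw [List.foldl_append, List.foldl_cons, List.foldl_nil, ih]
    exact pvA_step t s

-- B computes pvGroups of the symbol list
theorem pvB_eq (l : List String) :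
    (l.foldl (fun (d : PySem.Dict String Int) s => d.insert s (d.getD s 0 + 1))
      PySem.Dict.empty).items.map (fun p => PySem.List.pyRepeat [p.1] p.2)
    = pvGroups l := by
  have hkeys : (l.foldl (fun (d : PySem.Dict String Int) s => d.insert s (d.getD s 0 + 1))
      PySem.Dict.empty).keys = PySem.Set.ofList l := by
    rw [PySem.Dict.keys_foldl_insert]
    simp only [PySem.Dict.keys_empty, PySem.Set.update_nil_left]
  have hnd : (l.foldl (fun (d : PySem.Dict String Int) s => d.insert s (d.getD s 0 + 1))
      PySem.Dict.empty).keys.Nodup := hkeys ▸ PySem.Set.nodup_ofList l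
  rw [PySem.Dict.items_eq_map_keys _ hnd 0, hkeys, List.map_map, pvGroups]
  apply List.map_congr_left
  intro k hk
  simp only [Function.comp]
  rw [PySem.Dict.getD_foldl_insert_add_one, PySem.Dict.getD_empty, PySem.List.pyRepeat_singleton]
  simp

-- ===== VERDICT (by name: the statement is the Claim_ definition above) =====
theorem zip_duplicates_spec : Claim_equal_zip_duplicates := by
  intro string _
  show zip_duplicates string = zip_duplicates_alt string
  calc zip_duplicates string
      = (string.toList.map String.singleton).foldl (fun gen_mass s =>
          let index_collection := search_index_complex gen_mass s
          if index_collection == -1 then gen_mass ++ [[s]]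
          else gen_mass.modify index_collection.toNat (fun col => col ++ [s])) [] := by
        rw [List.foldl_map]; rfl
    _ = pvGroups (string.toList.map String.singleton) := pvA_eq _
    _ = ((string.toList.map String.singleton).foldl
          (fun (d : PySem.Dict String Int) s => d.insert s (d.getD s 0 + 1))
          PySem.Dict.empty).items.map (fun p => PySem.List.pyRepeat [p.1] p.2) :=
        (pvB_eq _).symm
    _ = zip_duplicates_alt string := by rw [List.foldl_map]; rfl
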